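-- pv_equiv track=rewrite | github.com/scnkera/Repeat | main.py | first_uncommon
-- ===== SOURCE A (Python) =====
-- def first_uncommon(matrix, n):
--     # Your implementation here!
--     hash_table = {}
--     for row in matrix:
--         for letter in row:
--             if letter not in hash_table:
--                 hash_table[letter] = 1
--             else:
--                 hash_table[letter] += 1
--
--     # option 1
--     # viable_list = []
--
--     # for letter, freq in hash_table.items():
--     #     if freq < n:
--     #         viable_list.append(letter)
--
--     # letter = viable_list[0]
--
--     # return letter
--
--     # option 2
--
--     for row in matrix:
--         for letter in row:
--             if hash_table[letter] < n:
--                 return letter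
-- ===== SOURCE B (Python) =====
-- def first_uncommon(matrix, n):
--     # One counting pass storing (count, first_occurrence_index); then pick the
--     # qualifying letter with the smallest first-occurrence index -- no second
--     # scan of the matrix.
--     info = {}
--     pos = 0
--     for row in matrix:
--         for letter in row:
--             if letter in info:
--                 c, f = info[letter]
--                 info[letter] = (c + 1, f)
--             else:
--                 info[letter] = (1, pos)
--             pos += 1
--     best = None
--     for letter, (c, f) in info.items():
--         if c < n and (best is None or f < best[0]):
--             best = (f, letter)
--     return None if best is None else best[1]
-- ===== Notes on version B (the rewrite author's own statement) =====
-- stated objective: alternative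
-- what changed: B replaces A's second full nested scan of the matrix by a single counting pass that also records each letter's first-occurrence index, then selects the qualifying letter with the minimal recorded index from the dict items.
import Mathlib
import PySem

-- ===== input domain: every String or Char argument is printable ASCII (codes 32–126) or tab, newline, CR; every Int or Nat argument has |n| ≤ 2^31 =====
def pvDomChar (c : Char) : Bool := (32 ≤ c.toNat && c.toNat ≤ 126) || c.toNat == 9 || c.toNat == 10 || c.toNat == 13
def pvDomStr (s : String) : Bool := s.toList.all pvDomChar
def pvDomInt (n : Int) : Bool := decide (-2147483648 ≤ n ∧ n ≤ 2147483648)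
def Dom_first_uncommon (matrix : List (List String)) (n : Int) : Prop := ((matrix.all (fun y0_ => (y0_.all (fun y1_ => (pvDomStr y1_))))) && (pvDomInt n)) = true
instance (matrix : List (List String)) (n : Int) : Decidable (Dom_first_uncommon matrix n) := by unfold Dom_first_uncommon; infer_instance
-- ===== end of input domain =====

-- B replaces A's second full nested scan of the matrix by recording each letter's
-- first-occurrence index during the single counting pass and selecting the
-- qualifying letter with the minimal recorded index from the dict items (objective: alternative).

-- ===== PORT A =====
-- counting loop body: 'if letter not in hash_table: hash_table[letter] = 1 else: hash_table[letter] += 1'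
-- (hash_table[letter] is read only when the key is present, so getD _ 0 is exact there)
def pvCountA (h : PySem.Dict String Int) (letter : String) : PySem.Dict String Int :=
  if ¬ (h.contains letter = true) then h.insert letter 1
  else h.insert letter (h.getD letter 0 + 1)

-- second loop, inner 'for letter in row: if hash_table[letter] < n: return letter'
-- (every letter scanned comes from the matrix, so the key is present and getD _ 0 is exact)
def pvScanRowA (h : PySem.Dict String Int) (n : Int) : List String → Option String
  | [] => none
  | letter :: rest => if h.getD letter 0 < n then some letter else pvScanRowA h n rest

def pvScanA (h : PySem.Dict String Int) (n : Int) : List (List String) → Option String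
  | [] => none
  | row :: rest =>
    match pvScanRowA h n row with
    | some l => some l
    | none => pvScanA h n rest

def first_uncommon (matrix : List (List String)) (n : Int) : Option String :=
  let hash_table := matrix.foldl (fun h row => row.foldl pvCountA h) PySem.Dict.empty
  pvScanA hash_table n matrix

-- ===== PORT B =====
-- counting loop body of Source B: dict letter ↦ (count, first-occurrence position), plus the running position
-- (info[letter] is read only when the key is present, so getD _ (0,0) is exact there)
def pvCountB (s : PySem.Dict String (Int × Int) × Int) (letter : String) :
    PySem.Dict String (Int × Int) × Int :=
  if s.1.contains letter = true then
    let cf := s.1.getD letter (0, 0)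
    (s.1.insert letter (cf.1 + 1, cf.2), s.2 + 1)
  else
    (s.1.insert letter (1, s.2), s.2 + 1)

-- selection loop body: 'if c < n and (best is None or f < best[0]): best = (f, letter)'
def pvBestB (n : Int) (best : Option (Int × String)) (p : String × (Int × Int)) :
    Option (Int × String) :=
  if (decide (p.2.1 < n) && (match best with | none => true | some b => decide (p.2.2 < b.1))) = true
  then some (p.2.2, p.1) else best

def first_uncommon_alt (matrix : List (List String)) (n : Int) : Option String :=
  let s := matrix.foldl (fun s row => row.foldl pvCountB s) (PySem.Dict.empty, 0)
  let best := s.1.items.foldl (pvBestB n) none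
  match best with
  | none => none
  | some b => some b.2

-- ===== PRECONDITION & SPEC =====
def Spec_first_uncommon (matrix : List (List String)) (n : Int) (out : Option String) : Prop := out = first_uncommon_alt matrix n
instance (matrix : List (List String)) (n : Int) (out : Option String) : Decidable (Spec_first_uncommon matrix n out) := by unfold Spec_first_uncommon; infer_instance

-- ===== CLAIM (what is proved, stated in full; the proofs are below) =====
def Claim_equal_first_uncommon : Prop := ∀ (matrix : List (List String)) (n : Int), Dom_first_uncommon matrix n → Spec_first_uncommon matrix n (first_uncommon matrix n)

-- ===== LEMMAS AND PROOFS =====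

-- the one predicate both programs select by: 'this letter occurs fewer than n times'
def pvQ (xs : List String) (n : Int) : String → Bool := fun l => decide ((xs.count l : Int) < n)

-- the items list B's counting pass builds over the flattened letter sequence xs
def pvSpecItems (xs : List String) : List (String × (Int × Int)) :=
  (PySem.Set.ofList xs).map (fun l => (l, ((xs.count l : Int), (xs.idxOf l : Int))))

theorem pvCountA_eq (d : PySem.Dict String Int) (x : String) :
    pvCountA d x = d.insert x (d.getD x 0 + 1) := by
  unfold pvCountA
  by_cases hc : d.contains x = true
  · simp [hc]
  · have hf : d.contains x = false := by simpa using hc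
    simp [hf, PySem.Dict.getD_of_not_contains]

theorem pvA_count (matrix : List (List String)) :
    matrix.foldl (fun h row => row.foldl pvCountA h) PySem.Dict.empty
      = PySem.Dict.counter matrix.flatten := by
  rw [← List.foldl_flatten]
  rw [PySem.List.foldl_congr_mem matrix.flatten pvCountA (fun d x => d.insert x (d.getD x 0 + 1)) _ (fun acc x _ => pvCountA_eq acc x)]
  exact PySem.Dict.foldl_insert_getD_add_one_eq_counter _

theorem pvScanRowA_eq (h : PySem.Dict String Int) (n : Int) (row : List String) :
    pvScanRowA h n row = row.find? (fun l => decide (h.getD l 0 < n)) := by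
  induction row with
  | nil => rfl
  | cons a t ih =>
    simp only [pvScanRowA, List.find?_cons, ih]
    by_cases hq : h.getD a 0 < n <;> simp [hq]

theorem pvScanA_eq (h : PySem.Dict String Int) (n : Int) (m : List (List String)) :
    pvScanA h n m = m.flatten.find? (fun l => decide (h.getD l 0 < n)) := by
  induction m with
  | nil => rfl
  | cons row rest ih =>
    simp only [pvScanA, pvScanRowA_eq, List.flatten_cons, List.find?_append, ih]
    cases hr : row.find? (fun l => decide (h.getD l 0 < n)) <;> simp [Option.or]

theorem pvA_eq_find (matrix : List (List String)) (n : Int) :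
    first_uncommon matrix n = matrix.flatten.find? (pvQ matrix.flatten n) := by
  show pvScanA _ n matrix = _
  rw [pvA_count, pvScanA_eq]
  congr 1
  funext l
  rw [PySem.Dict.getD_counter]
  rfl

theorem pvOfList_append (xs : List String) (a : String) :
    PySem.Set.ofList (xs ++ [a]) = PySem.Set.add (PySem.Set.ofList xs) a := by
  rw [PySem.Set.ofList_eq_foldl, List.foldl_append, ← PySem.Set.ofList_eq_foldl]
  rfl

theorem pvOfList_mem {xs : List String} {a : String} (ha : a ∈ xs) :
    PySem.Set.ofList (xs ++ [a]) = PySem.Set.ofList xs := by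
  rw [pvOfList_append]
  simp [PySem.Set.add]; exact ha

theorem pvOfList_not_mem {xs : List String} {a : String} (ha : a ∉ xs) :
    PySem.Set.ofList (xs ++ [a]) = PySem.Set.ofList xs ++ [a] := by
  rw [pvOfList_append]
  simp [PySem.Set.add]; exact ha

theorem pvB_count (xs : List String) :
    xs.foldl pvCountB (PySem.Dict.empty, 0)
      = (PySem.Dict.mk (pvSpecItems xs), (xs.length : Int)) := by
  induction xs using List.reverseRecOn with
  | nil => rfl
  | append_singleton xs a ih =>
    rw [List.foldl_append, ih]
    have hitems : (PySem.Dict.mk (pvSpecItems xs)).items = pvSpecItems xs := rfl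
    have hkeys : (PySem.Dict.mk (pvSpecItems xs)).keys = PySem.Set.ofList xs := by
      simp [pvSpecItems, List.map_map, Function.comp_def]
    have hnd : (PySem.Dict.mk (pvSpecItems xs)).keys.Nodup := by
      rw [hkeys]; exact PySem.Set.nodup_ofList xs
    by_cases ha : a ∈ xs
    · -- a already counted: overwrite its (count, first-index) pair in place
      have hc : (PySem.Dict.mk (pvSpecItems xs)).contains a = true := by
        rw [PySem.Dict.contains_iff_mem_keys, hkeys, PySem.Set.mem_ofList]; exact ha
      have hmem : (a, ((xs.count a : Int), (xs.idxOf a : Int))) ∈ (PySem.Dict.mk (pvSpecItems xs)).items := by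
        rw [hitems]
        exact List.mem_map_of_mem ((PySem.Set.mem_ofList xs a).mpr ha)
      have hgetD := PySem.Dict.getD_of_mem_items _ hmem hnd ((0 : Int), (0 : Int))
      have hof := pvOfList_mem ha
      simp only [List.foldl_cons, List.foldl_nil, pvCountB, hc, if_pos, hgetD]
      refine Prod.ext ?_ ?_
      · apply PySem.Dict.ext
        rw [PySem.Dict.items_insert_of_contains _ _ hc, hitems]
        show List.map _ (pvSpecItems xs) = (PySem.Dict.mk (pvSpecItems (xs ++ [a]))).items
        rw [show (PySem.Dict.mk (pvSpecItems (xs ++ [a]))).items = pvSpecItems (xs ++ [a]) from rfl]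
        unfold pvSpecItems
        rw [hof, List.map_map]
        apply List.map_congr_left
        intro l hl
        have hlx : l ∈ xs := (PySem.Set.mem_ofList xs l).mp hl
        by_cases hla : l = a
        · subst hla
          simp [List.count_append, List.idxOf_append_of_mem ha]
        · have hba : (l == a) = false := by simp [hla]
          simp only [Function.comp_apply, hba, Bool.false_eq_true, if_false]
          have hcnt : (xs ++ [a]).count l = xs.count l := by
            simp [List.count_append, List.count_singleton]
            exact fun h => hla h.symm
          rw [hcnt, List.idxOf_append_of_mem hlx]
      · simp
    · -- first occurrence of a: append (a, (1, current position))
      have hc : (PySem.Dict.mk (pvSpecItems xs)).contains a = false := by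
        rw [← Bool.not_eq_true, PySem.Dict.contains_iff_mem_keys, hkeys, PySem.Set.mem_ofList]
        exact ha
      have hof := pvOfList_not_mem ha
      simp only [List.foldl_cons, List.foldl_nil, pvCountB, hc, Bool.false_eq_true, if_false]
      refine Prod.ext ?_ ?_
      · apply PySem.Dict.ext
        rw [PySem.Dict.items_insert_of_not_contains _ _ hc, hitems]
        show pvSpecItems xs ++ [(a, ((1 : Int), (xs.length : Int)))] = (PySem.Dict.mk (pvSpecItems (xs ++ [a]))).items
        rw [show (PySem.Dict.mk (pvSpecItems (xs ++ [a]))).items = pvSpecItems (xs ++ [a]) from rfl]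
        unfold pvSpecItems
        rw [hof, List.map_append]
        congr 1
        · apply List.map_congr_left
          intro l hl
          have hlx : l ∈ xs := (PySem.Set.mem_ofList xs l).mp hl
          have hla : l ≠ a := fun h => ha (h ▸ hlx)
          have hcnt : (xs ++ [a]).count l = xs.count l := by
            simp [List.count_append, List.count_singleton]
            exact fun h => hla h.symm
          rw [hcnt, List.idxOf_append_of_mem hlx]
        · have hidx : (xs ++ [a]).idxOf a = xs.length := by
            rw [List.idxOf_append_of_notMem ha]
            simp
          simp [hidx, List.count_eq_zero_of_not_mem ha]
      · simp

theorem pvPairwise (xs : List String) :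
    (pvSpecItems xs).Pairwise (fun p q => p.2.2 < q.2.2) := by
  unfold pvSpecItems
  rw [List.pairwise_map]
  have h : (PySem.Set.ofList xs).Pairwise (fun a b => xs.idxOf a < xs.idxOf b) := by
    induction xs using List.reverseRecOn with
    | nil => simp [PySem.Set.ofList]
    | append_singleton xs a ih =>
      by_cases ha : a ∈ xs
      · rw [pvOfList_mem ha]
        refine List.Pairwise.imp_of_mem ?_ ih
        intro x y hx hy hxy
        rw [List.idxOf_append_of_mem ((PySem.Set.mem_ofList xs x).mp hx),
            List.idxOf_append_of_mem ((PySem.Set.mem_ofList xs y).mp hy)]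
        exact hxy
      · rw [pvOfList_not_mem ha]
        refine List.pairwise_append.mpr ⟨?_, by simp, ?_⟩
        · refine List.Pairwise.imp_of_mem ?_ ih
          intro x y hx hy hxy
          rw [List.idxOf_append_of_mem ((PySem.Set.mem_ofList xs x).mp hx),
              List.idxOf_append_of_mem ((PySem.Set.mem_ofList xs y).mp hy)]
          exact hxy
        · intro x hx y hy
          rw [List.mem_singleton] at hy
          subst hy
          have hxm : x ∈ xs := (PySem.Set.mem_ofList xs x).mp hx
          rw [List.idxOf_append_of_mem hxm, List.idxOf_append_of_notMem ha]
          simpa using List.idxOf_lt_length_of_mem hxm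
  exact h.imp (fun hab => Int.ofNat_lt.mpr hab)

theorem pvBest_keep (n : Int) (l : List (String × (Int × Int))) (b : Int × String)
    (h : ∀ p ∈ l, ¬ (p.2.2 < b.1)) : l.foldl (pvBestB n) (some b) = some b := by
  induction l with
  | nil => rfl
  | cons p t ih =>
    have hp : pvBestB n (some b) p = some b := by
      unfold pvBestB
      simp [h p List.mem_cons_self]
    rw [List.foldl_cons, hp]
    exact ih fun q hq => h q (List.mem_cons_of_mem _ hq)

theorem pvBest_find (n : Int) (l : List (String × (Int × Int)))
    (h : l.Pairwise (fun p q => p.2.2 < q.2.2)) :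
    l.foldl (pvBestB n) none
      = (l.find? (fun p => decide (p.2.1 < n))).map (fun p => (p.2.2, p.1)) := by
  induction l with
  | nil => rfl
  | cons p t ih =>
    rw [List.pairwise_cons] at h
    rw [List.foldl_cons]
    by_cases hq : p.2.1 < n
    · have hp : pvBestB n none p = some (p.2.2, p.1) := by
        unfold pvBestB; simp [hq]
      rw [hp, pvBest_keep n t _ (fun q hqt => not_lt.mpr (le_of_lt (h.1 q hqt)))]
      simp [hq]
    · have hp : pvBestB n none p = none := by
        unfold pvBestB; simp [hq]
      rw [hp, ih h.2]
      simp [hq]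

theorem pvFind_ofList (q : String → Bool) (xs : List String) :
    List.find? q (PySem.Set.ofList xs) = List.find? q xs := by
  induction xs using List.reverseRecOn with
  | nil => rfl
  | append_singleton xs a ih =>
    rw [List.find?_append]
    by_cases ha : a ∈ xs
    · rw [pvOfList_mem ha, ih]
      cases hf : xs.find? q with
      | some v => simp
      | none =>
        have hqa : q a = false := by
          have := List.find?_eq_none.mp hf a ha
          simpa using this
        simp [hqa]
    · rw [pvOfList_not_mem ha, List.find?_append, ih]

theorem pvB_eq_find (matrix : List (List String)) (n : Int) :
    first_uncommon_alt matrix n = matrix.flatten.find? (pvQ matrix.flatten n) := by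
  unfold first_uncommon_alt
  rw [← List.foldl_flatten, pvB_count]
  show (match List.foldl (pvBestB n) none (pvSpecItems matrix.flatten) with
        | none => none
        | some b => some b.2) = List.find? (pvQ matrix.flatten n) matrix.flatten
  rw [pvBest_find n _ (pvPairwise matrix.flatten)]
  unfold pvSpecItems
  rw [List.find?_map, pvFind_ofList]
  have hpred : ((fun p => decide (p.2.1 < n)) ∘
      fun l => (l, ((matrix.flatten.count l : Int), (matrix.flatten.idxOf l : Int)))) = pvQ matrix.flatten n := rfl
  rw [hpred]
  cases hf : List.find? (pvQ matrix.flatten n) matrix.flatten <;> rfl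

-- ===== VERDICT (by name: the statement is the Claim_ definition above) =====
theorem first_uncommon_spec : Claim_equal_first_uncommon := by
  intro matrix n _
  unfold Spec_first_uncommon
  rw [pvA_eq_find, pvB_eq_find]
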